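-- pv_equiv track=rewrite | github.com/isayaksh/Algorithm | BaekJoon/9342.py | solution
-- ===== SOURCE A (Python) =====
-- def solution(word):
--     N = len(word)
--
--     # 문자열은 {A, B, C, D, E, F} 중 0개 또는 1개로 시작해야 한다.
--     if word[0] not in ('A', 'B', 'C', 'D', 'E', 'F'):
--         return "Good"
--
--     idx = 0 if word[0] == 'A' else 1
--
--     # 그 다음에는 A가 하나 또는 그 이상 있어야 한다.
--     while idx < N and word[idx] == 'A':
--         idx+= 1
--
--     # 그 다음에는 F가 하나 또는 그 이상 있어야 한다.
--     while idx < N and word[idx] == 'F':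
--         idx+= 1
--
--     # 그 다음에는 C가 하나 또는 그 이상 있어야 한다.
--     while idx < N and word[idx] == 'C':
--         idx+= 1
--
--     # 그 다음에는 {A, B, C, D, E, F} 중 0개 또는 1개가 있으며, 더 이상의 문자는 없어야 한다.
--     if word[-1] not in ('A', 'B', 'C', 'D', 'E', 'F'):
--         return "Good"
--
--     return "Infected!" if idx == N else "Good"
-- ===== SOURCE B (Python) =====
-- def solution(word):
--     # count-and-rebuild: word is infected iff the body equals its canonical A...F...C... form
--     if word[0] not in 'ABCDEF':
--         return "Good"
--     body = word if word[0] == 'A' else word[1:]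
--     canonical = 'A' * body.count('A') + 'F' * body.count('F') + 'C' * body.count('C')
--     return "Infected!" if body == canonical else "Good"
-- ===== Notes on version B (the rewrite author's own statement) =====
-- stated objective: alternative
-- what changed: Replaces the three sequential greedy index-advancing while-loops plus the redundant last-character check with a count-and-rebuild test: the body matches the pattern iff it equals the concatenation of its own letter counts of each of the three run characters, in order.
import Mathlib
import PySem

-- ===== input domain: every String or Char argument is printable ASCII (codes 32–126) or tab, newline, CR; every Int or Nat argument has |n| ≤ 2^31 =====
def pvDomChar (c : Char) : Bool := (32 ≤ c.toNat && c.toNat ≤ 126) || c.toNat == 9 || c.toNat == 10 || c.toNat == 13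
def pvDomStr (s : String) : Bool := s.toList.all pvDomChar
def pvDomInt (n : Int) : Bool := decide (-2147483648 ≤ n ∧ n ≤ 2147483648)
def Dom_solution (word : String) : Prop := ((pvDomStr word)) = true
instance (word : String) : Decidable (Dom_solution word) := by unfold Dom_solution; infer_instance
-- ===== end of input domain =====

-- B rebuilds the body from letter counts instead of A's three greedy scans; same O(n) cost, different algorithm.
-- ===== PORT A =====
-- one while-loop 'while idx < N and word[idx] == t: idx += 1', with idx represented as the remaining suffix
def skipCh (t : Char) : List Char → List Char
  | [] => []
  | c :: rest => if c = t then skipCh t rest else c :: rest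

def solution (word : String) : String :=
  let cs := word.toList
  match PySem.List.pyGet? cs 0 with
  | none => ""   -- word[0] raises IndexError here; excluded by Pre_solution
  | some c0 =>
    if ¬ (c0 = 'A' ∨ c0 = 'B' ∨ c0 = 'C' ∨ c0 = 'D' ∨ c0 = 'E' ∨ c0 = 'F') then "Good"
    else
      -- idx = 0 if word[0]=='A' else 1; the three while-loops advance idx
      let start := if c0 = 'A' then cs else cs.drop 1
      let r := skipCh 'C' (skipCh 'F' (skipCh 'A' start))
      match PySem.List.pyGet? cs (-1) with
      | none => ""   -- unreachable when cs ≠ []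
      | some cl =>
        if ¬ (cl = 'A' ∨ cl = 'B' ∨ cl = 'C' ∨ cl = 'D' ∨ cl = 'E' ∨ cl = 'F') then "Good"
        else if r = [] then "Infected!" else "Good"

-- ===== PORT B =====
def solution_alt (word : String) : String :=
  let cs := word.toList
  match PySem.List.pyGet? cs 0 with
  | none => ""   -- word[0] raises IndexError here; excluded by Pre_solution
  | some c0 =>
    if ("ABCDEF".toList).contains c0 then
      let body := if c0 = 'A' then cs else cs.drop 1
      let canonical := List.replicate (body.count 'A') 'A'
          ++ List.replicate (body.count 'F') 'F'
          ++ List.replicate (body.count 'C') 'C'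
      if body = canonical then "Infected!" else "Good"
    else "Good"

-- ===== PRECONDITION & SPEC =====
-- Pre_ excludes only the empty string, on which both Pythons raise IndexError at word[0].
def Pre_solution (word : String) : Prop := word ≠ ""
instance (word : String) : Decidable (Pre_solution word) := by unfold Pre_solution; infer_instance
def pvWitness_solution : String := ("AAFC")

def Spec_solution (word : String) (out : String) : Prop := out = solution_alt word
instance (word : String) (out : String) : Decidable (Spec_solution word out) := by unfold Spec_solution; infer_instance

-- ===== CLAIM (what is proved, stated in full; the proofs are below) =====
def Claim_equal_solution : Prop := ∀ (word : String), Dom_solution word → Pre_solution word → Spec_solution word (solution word)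

-- ===== LEMMAS AND PROOFS =====

theorem skipCh_eq_dropWhile (t : Char) (l : List Char) :
    skipCh t l = l.dropWhile (· == t) := by
  induction l with
  | nil => rfl
  | cons c rest ih =>
    by_cases h : c = t <;> simp [skipCh, h, ih]

theorem drop_one_eq_nil_iff (a : Char) (l : List Char) :
    l.dropWhile (· == a) = [] ↔ l = List.replicate (l.count a) a := by
  rw [List.dropWhile_eq_nil_iff]
  constructor
  · intro h
    have hc : l.count a = l.length := by
      rw [List.count_eq_length]
      intro b hb; exact (eq_of_beq (h b hb)).symm
    rw [hc, List.eq_replicate_length]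
    intro b hb; have := h b hb; simpa using this
  · intro h b hb
    rw [h] at hb
    simpa using (List.eq_of_mem_replicate hb)

theorem drop_two_eq_nil_iff (l : List Char) :
    (l.dropWhile (· == 'F')).dropWhile (· == 'C') = [] ↔
      l = List.replicate (l.count 'F') 'F' ++ List.replicate (l.count 'C') 'C' := by
  induction l with
  | nil => simp
  | cons c rest ih =>
    by_cases hF : c = 'F'
    · subst hF
      rw [List.dropWhile_cons_of_pos (by simp), ih,
        List.count_cons_self, List.count_cons_of_ne (by decide : ('F' : Char) ≠ 'C'),
        List.replicate_succ, List.cons_append]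
      constructor
      · intro h; rw [← h]
      · intro h; injection h
    · rw [List.dropWhile_cons_of_neg (by simpa using hF), drop_one_eq_nil_iff]
      constructor
      · intro h
        have h0 : (c :: rest).count 'F' = 0 := by
          have := congrArg (List.count 'F') h
          simpa [List.count_replicate] using this
        rw [h0]; simpa using h
      · intro h
        rcases hn : (c :: rest).count 'F' with _ | n
        · rw [hn] at h; simpa using h
        · rw [hn, List.replicate_succ, List.cons_append] at h
          exact absurd (by injection h) hF

theorem drop_three_eq_nil_iff (l : List Char) :
    ((l.dropWhile (· == 'A')).dropWhile (· == 'F')).dropWhile (· == 'C') = [] ↔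
      l = List.replicate (l.count 'A') 'A' ++ List.replicate (l.count 'F') 'F'
          ++ List.replicate (l.count 'C') 'C' := by
  induction l with
  | nil => simp
  | cons c rest ih =>
    by_cases hA : c = 'A'
    · subst hA
      rw [List.dropWhile_cons_of_pos (by simp), ih,
        List.count_cons_self, List.count_cons_of_ne (by decide : ('A' : Char) ≠ 'F'),
        List.count_cons_of_ne (by decide : ('A' : Char) ≠ 'C'),
        List.replicate_succ, List.cons_append, List.cons_append]
      constructor
      · intro h; rw [← h]
      · intro h; injection h
    · rw [List.dropWhile_cons_of_neg (by simpa using hA), drop_two_eq_nil_iff]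
      constructor
      · intro h
        have h0 : (c :: rest).count 'A' = 0 := by
          have := congrArg (List.count 'A') h
          simpa [List.count_replicate] using this
        rw [h0]; simpa using h
      · intro h
        rcases hn : (c :: rest).count 'A' with _ | n
        · rw [hn] at h; simpa using h
        · rw [hn, List.replicate_succ, List.cons_append, List.cons_append] at h
          exact absurd (by injection h) hA

-- every element of the canonical form is one of A, F, C
theorem mem_canonical {x : Char} {a f c : Nat}
    (hx : x ∈ List.replicate a 'A' ++ List.replicate f 'F' ++ List.replicate c 'C') :
    x = 'A' ∨ x = 'F' ∨ x = 'C' := by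
  simp only [List.mem_append, List.mem_replicate] at hx
  rcases hx with (⟨_, h⟩ | ⟨_, h⟩) | ⟨_, h⟩ <;> simp [h]

-- ===== VERDICT (by name: the statement is the Claim_ definition above) =====
theorem solution_spec : Claim_equal_solution := by
  unfold Claim_equal_solution
  intro word _ hpre
  unfold Spec_solution solution solution_alt
  have hcs : word.toList ≠ [] := by
    intro h; apply hpre
    have := congrArg String.ofList h
    simpa using this
  rcases hl : word.toList with _ | ⟨c0, rest⟩
  · exact absurd hl hcs
  simp only [PySem.List.pyGet?_zero_cons]
  by_cases hmem : c0 = 'A' ∨ c0 = 'B' ∨ c0 = 'C' ∨ c0 = 'D' ∨ c0 = 'E' ∨ c0 = 'F'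
  · have hmem' : (("ABCDEF".toList).contains c0) = true := by
      rcases hmem with h | h | h | h | h | h <;> subst h <;> decide
    rw [if_neg (not_not.mpr hmem), if_pos hmem']
    have hne : (c0 :: rest) ≠ ([] : List Char) := by simp
    set body := (if c0 = 'A' then c0 :: rest else (c0 :: rest).drop 1) with hbody
    have hchain : (skipCh 'C' (skipCh 'F' (skipCh 'A' body)) = []) ↔
        body = List.replicate (body.count 'A') 'A' ++ List.replicate (body.count 'F') 'F'
            ++ List.replicate (body.count 'C') 'C' := by
      rw [skipCh_eq_dropWhile, skipCh_eq_dropWhile, skipCh_eq_dropWhile]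
      exact drop_three_eq_nil_iff body
    have hlast : PySem.List.pyGet? (c0 :: rest) (-1) = some ((c0 :: rest).getLast hne) := by
      rw [PySem.List.pyGet?_neg_one]
      exact List.getLast?_eq_some_getLast hne
    simp only [hlast]
    by_cases hr : skipCh 'C' (skipCh 'F' (skipCh 'A' body)) = []
    · -- body is canonical; the last-char test passes, both answer "Infected!"
      have hcan := hchain.mp hr
      have hlmem : (c0 :: rest).getLast hne = 'A' ∨ (c0 :: rest).getLast hne = 'F'
          ∨ (c0 :: rest).getLast hne = 'C' ∨ (c0 :: rest).getLast hne = c0 := by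
        by_cases hA : c0 = 'A'
        · rw [hbody, if_pos hA] at hcan
          have hm : (c0 :: rest).getLast hne ∈ (List.replicate ((c0 :: rest).count 'A') 'A'
              ++ List.replicate ((c0 :: rest).count 'F') 'F'
              ++ List.replicate ((c0 :: rest).count 'C') 'C') := by
            rw [← hcan]; exact List.getLast_mem hne
          rcases mem_canonical hm with h | h | h
          · exact Or.inl h
          · exact Or.inr (Or.inl h)
          · exact Or.inr (Or.inr (Or.inl h))
        · rw [hbody, if_neg hA] at hcan
          by_cases hrest : rest = []
          · subst hrest; right; right; right; simp
          · have hne2 : rest ≠ [] := hrest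
            have hgl : (c0 :: rest).getLast hne = rest.getLast hne2 := List.getLast_cons hne2
            rw [show (c0 :: rest).drop 1 = rest from rfl] at hcan
            have hm : rest.getLast hne2 ∈ (List.replicate (rest.count 'A') 'A'
                ++ List.replicate (rest.count 'F') 'F'
                ++ List.replicate (rest.count 'C') 'C') := by
              rw [← hcan]; exact List.getLast_mem hne2
            rw [hgl]
            rcases mem_canonical hm with h | h | h
            · exact Or.inl h
            · exact Or.inr (Or.inl h)
            · exact Or.inr (Or.inr (Or.inl h))
      have hP : (c0 :: rest).getLast hne = 'A' ∨ (c0 :: rest).getLast hne = 'B'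
          ∨ (c0 :: rest).getLast hne = 'C' ∨ (c0 :: rest).getLast hne = 'D'
          ∨ (c0 :: rest).getLast hne = 'E' ∨ (c0 :: rest).getLast hne = 'F' := by
        rcases hlmem with h | h | h | h
        · exact Or.inl h
        · exact Or.inr (Or.inr (Or.inr (Or.inr (Or.inr h))))
        · exact Or.inr (Or.inr (Or.inl h))
        · rw [h]; exact hmem
      rw [if_neg (not_not.mpr hP), if_pos hr, if_pos hcan]
    · -- body not canonical: both answer "Good"
      have hcan : ¬ body = List.replicate (body.count 'A') 'A'
          ++ List.replicate (body.count 'F') 'F' ++ List.replicate (body.count 'C') 'C' :=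
        fun h => hr (hchain.mpr h)
      rw [if_neg hcan]
      split_ifs <;> rfl
  · have hmem' : (("ABCDEF".toList).contains c0) = false := by
      rw [show "ABCDEF".toList = ['A','B','C','D','E','F'] from rfl]
      simp only [List.contains_cons, List.contains_nil, Bool.or_eq_false_iff,
        beq_eq_false_iff_ne]
      push Not at hmem
      obtain ⟨h1, h2, h3, h4, h5, h6⟩ := hmem
      exact ⟨fun e => h1 (by simpa [eq_comm] using e), fun e => h2 (by simpa [eq_comm] using e),
        fun e => h3 (by simpa [eq_comm] using e), fun e => h4 (by simpa [eq_comm] using e),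
        fun e => h5 (by simpa [eq_comm] using e),
        ⟨fun e => h6 (by simpa [eq_comm] using e), trivial⟩⟩
    rw [if_pos (by simpa using hmem), hmem']
    simp
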